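-- pv_equiv track=rewrite | github.com/DrDonut326/AdventofCode | 2018/Day05.py | collapse_polymer
-- ===== SOURCE A (Python) =====
-- def do_polarities_match(a, b):
--     if a.lower() == b.lower():
--         return (a.islower() and b.isupper()) or (a.isupper() and b.islower())
--
-- def collapse_polymer(polymer):
--     ans = [polymer[0]]
--     bi = 1
--     p_length = len(polymer)
--     while bi < p_length:
--         # Edge case for if the front of the list gets nuked
--         # If the front 2 are matching set the front of answer to bi and increment
--         if len(ans) == 0:
--             ans.append(polymer[bi])
--             bi += 1
--
--         # A is always the last good letter of the polymer
--         a = ans[-1]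
--         # B increments along, skipping ahead of deletions
--         b = polymer[bi]
--
--         # If 2 letters match, get rid of the last good letter
--         if do_polarities_match(a, b):
--             # Matching letters
--             ans.pop()
--         else:
--             # No match
--             ans.append(b)
--         bi += 1
--
--     return ''.join(ans)
-- ===== SOURCE B (Python) =====
-- def collapse_polymer(polymer):
--     # String-rewriting fixpoint: repeatedly delete the leftmost reacting
--     # adjacent pair until the string is stable (no stack).
--     s = polymer
--     while True:
--         for i in range(len(s) - 1):
--             if s[i] != s[i + 1] and s[i].lower() == s[i + 1].lower():
--                 s = s[:i] + s[i + 2:]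
--                 break
--         else:
--             return s
-- ===== Notes on version B (the rewrite author's own statement) =====
-- stated objective: alternative
-- what changed: A's one-pass stack with a moving index is replaced by a string-rewriting fixpoint: repeatedly delete the leftmost reacting adjacent pair until no pair remains (correct because the pair-deletion rewriting system is confluent, proved in Lean).
import Mathlib
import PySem

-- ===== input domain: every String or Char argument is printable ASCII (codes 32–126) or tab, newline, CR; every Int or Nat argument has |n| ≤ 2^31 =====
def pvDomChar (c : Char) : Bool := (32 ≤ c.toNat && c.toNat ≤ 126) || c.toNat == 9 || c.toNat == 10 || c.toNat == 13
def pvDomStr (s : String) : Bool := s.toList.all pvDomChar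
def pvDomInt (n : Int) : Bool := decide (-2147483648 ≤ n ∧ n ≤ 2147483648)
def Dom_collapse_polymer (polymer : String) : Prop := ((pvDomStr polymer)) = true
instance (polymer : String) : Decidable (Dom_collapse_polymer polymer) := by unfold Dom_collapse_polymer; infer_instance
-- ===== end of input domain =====

-- B replaces A's single-pass stack algorithm by a string-rewriting fixpoint: repeatedly delete
-- the leftmost reacting adjacent pair until the string is stable (an alternative algorithm,
-- correct by confluence of the pair-deletion rewriting, proved below).

-- ===== PORT A =====
-- do_polarities_match: returns None (falsy) when the lowercased letters differ, else the Bool shown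
def pvMatchA (a b : Char) : Bool :=
  if PySem.Chars.lowerChar a = PySem.Chars.lowerChar b then
    (PySem.Chars.islower a && PySem.Chars.isupper b) || (PySem.Chars.isupper a && PySem.Chars.islower b)
  else false

-- the while loop; `ans` is the Python list in the same order (append/pop at the right end)
def pvLoopA (l : List Char) (ans : List Char) (bi : Nat) : List Char :=
  if h : bi < l.length then
    if hne : ans = [] then
      -- edge case: ans.append(polymer[bi]); bi += 1; then a = ans[-1], b = polymer[bi]
      let ans1 : List Char := [l[bi]]
      match PySem.List.pyGet? l ((bi + 1 : Nat) : Int) with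
      | none => ans1   -- Python raises IndexError here (these inputs are outside Pre_)
      | some b =>
        if pvMatchA (l[bi]) b then pvLoopA l ans1.dropLast (bi + 2)
        else pvLoopA l (ans1 ++ [b]) (bi + 2)
    else
      let a := ans.getLast hne
      let b := l[bi]
      if pvMatchA a b then pvLoopA l ans.dropLast (bi + 1)
      else pvLoopA l (ans ++ [b]) (bi + 1)
  else ans
termination_by l.length - bi
decreasing_by all_goals omega

def collapse_polymer (polymer : String) : String :=
  match PySem.List.pyGet? polymer.toList 0 with
  | none => ""   -- polymer[0] raises IndexError on the empty string (outside Pre_)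
  | some c0 => String.mk (pvLoopA polymer.toList [c0] 1)

-- ===== PORT B =====
-- s[i] != s[i+1] and s[i].lower() == s[i+1].lower()
def pvMatchB (c d : Char) : Bool :=
  (c != d) && (PySem.Chars.lowerChar c == PySem.Chars.lowerChar d)

-- Source B's inner for-loop: scan adjacent pairs left to right; at the first reacting pair
-- return the string with that pair deleted (s[:i] + s[i+2:], built here as the scanned
-- prefix consed back onto the tail); None when no pair reacts.
def pvRemoveFirst : List Char → Option (List Char)
  | a :: b :: t => if pvMatchB a b then some t else (pvRemoveFirst (b :: t)).map (a :: ·)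
  | _ => none

theorem pvRemoveFirst_length : ∀ {s t : List Char}, pvRemoveFirst s = some t → t.length + 2 = s.length := by
  intro s
  induction s with
  | nil => intro t h; simp [pvRemoveFirst] at h
  | cons a s ih =>
    intro t h
    cases s with
    | nil => simp [pvRemoveFirst] at h
    | cons b r =>
      rw [pvRemoveFirst] at h
      split_ifs at h with hm
      · cases h; simp
      · simp only [Option.map_eq_some_iff] at h
        obtain ⟨t', ht', rfl⟩ := h
        have := ih ht'
        simp at this ⊢; omega

-- Source B's outer while-loop: iterate pvRemoveFirst to a fixpoint
def pvFixB (s : List Char) : List Char :=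
  match h : pvRemoveFirst s with
  | none => s
  | some t => pvFixB t
termination_by s.length
decreasing_by have := pvRemoveFirst_length h; omega

def collapse_polymer_alt (polymer : String) : String :=
  String.mk (pvFixB polymer.toList)

-- ===== PRECONDITION & SPEC =====
-- used only to STATE the precondition: one left-to-right reaction step / full reduction
def pvPush (v : List Char) (c : Char) : List Char :=
  match v.getLast? with
  | none => [c]
  | some a => if pvMatchA a c then v.dropLast else v ++ [c]

def pvReduceL (l : List Char) : List Char := l.foldl pvPush []

-- Pre_ excludes exactly the inputs on which A raises IndexError: the empty string (polymer[0]),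
-- and strings of length ≥ 3 whose all-but-last part fully reacts away, where the edge case reads
-- polymer[bi] one position past the end.
def Pre_collapse_polymer (polymer : String) : Prop :=
  polymer ≠ "" ∧ ¬(3 ≤ polymer.toList.length ∧ pvReduceL polymer.toList.dropLast = [])
instance (polymer : String) : Decidable (Pre_collapse_polymer polymer) := by
  unfold Pre_collapse_polymer; infer_instance

def pvWitness_collapse_polymer : String := "abBA"

def Spec_collapse_polymer (polymer : String) (out : String) : Prop := out = collapse_polymer_alt polymer
instance (polymer : String) (out : String) : Decidable (Spec_collapse_polymer polymer out) := by unfold Spec_collapse_polymer; infer_instance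

-- ===== CLAIM (what is proved, stated in full; the proofs are below) =====
def Claim_equal_collapse_polymer : Prop := ∀ (polymer : String), Dom_collapse_polymer polymer → Pre_collapse_polymer polymer → Spec_collapse_polymer polymer (collapse_polymer polymer)

-- ===== LEMMAS AND PROOFS =====
theorem charLe (a c : Char) : (a ≤ c) ↔ (a.toNat ≤ c.toNat) := by
  rw [Char.le_def]; exact UInt32.le_iff_toNat_le
theorem toNatInj (a b : Char) (h : a.toNat = b.toNat) : a = b := by
  apply Char.ext; exact UInt32.toNat_inj.mp h

theorem isu_iff (c : Char) : PySem.Chars.isupper c = true ↔ 65 ≤ c.toNat ∧ c.toNat ≤ 90 := by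
  simp [PySem.Chars.isupper, charLe]
theorem isl_iff (c : Char) : PySem.Chars.islower c = true ↔ 97 ≤ c.toNat ∧ c.toNat ≤ 122 := by
  simp [PySem.Chars.islower, charLe]
theorem lower_toNat (c : Char) : (PySem.Chars.lowerChar c).toNat =
    if 65 ≤ c.toNat ∧ c.toNat ≤ 90 then c.toNat + 32 else c.toNat := by
  rw [PySem.Chars.lowerChar]
  by_cases h : PySem.Chars.isupper c = true
  · rw [if_pos h, Char.toNat_ofNat, if_pos, if_pos ((isu_iff c).mp h)]
    have := (isu_iff c).mp h
    simp [Nat.isValidChar]; omega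
  · rw [if_neg h, if_neg]; rw [isu_iff] at h; exact h

theorem charEqIff (a b : Char) : a = b ↔ a.toNat = b.toNat :=
  ⟨fun h => h ▸ rfl, toNatInj a b⟩

theorem pvMatchAB (a b : Char) : pvMatchA a b = pvMatchB a b := by
  have hA := lower_toNat a
  have hB := lower_toNat b
  rw [pvMatchA, pvMatchB]
  by_cases h : PySem.Chars.lowerChar a = PySem.Chars.lowerChar b
  · rw [if_pos h]
    have hn : (PySem.Chars.lowerChar a).toNat = (PySem.Chars.lowerChar b).toNat := by rw [h]
    rw [hA, hB] at hn
    apply Bool.eq_iff_iff.mpr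
    simp only [Bool.or_eq_true, Bool.and_eq_true, isl_iff, isu_iff, bne_iff_ne, ne_eq,
      beq_iff_eq, h, and_true, charEqIff]
    constructor
    · intro hx hab
      split_ifs at hn <;> omega
    · intro hab
      split_ifs at hn <;> omega
  · rw [if_neg h]
    have : (PySem.Chars.lowerChar a == PySem.Chars.lowerChar b) = false := by
      simpa using h
    rw [this, Bool.and_false]

theorem pvMatchA_unique {a h c : Char} (h1 : pvMatchA a h = true) (h2 : pvMatchA h c = true) :
    a = c := by
  rw [pvMatchA] at h1 h2
  split_ifs at h1 h2 with e1 e2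
  have n1 : (PySem.Chars.lowerChar a).toNat = (PySem.Chars.lowerChar h).toNat := by rw [e1]
  have n2 : (PySem.Chars.lowerChar h).toNat = (PySem.Chars.lowerChar c).toNat := by rw [e2]
  rw [lower_toNat, lower_toNat] at n1 n2
  simp only [Bool.or_eq_true, Bool.and_eq_true, isl_iff, isu_iff] at h1 h2
  apply toNatInj
  split_ifs at n1 n2 <;> omega

theorem pvPush_nil (c : Char) : pvPush [] c = [c] := rfl
theorem pvPush_last {v : List Char} {g : Char} (hg : v.getLast? = some g) (c : Char) :
    pvPush v c = if pvMatchA g c then v.dropLast else v ++ [c] := by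
  simp only [pvPush, hg]

theorem pvReduceL_concat (u : List Char) (c : Char) :
    pvReduceL (u ++ [c]) = pvPush (pvReduceL u) c := by
  rw [pvReduceL, pvReduceL, List.foldl_concat]

-- irreducibility predicate: no adjacent reacting pair
def pvIrred (l : List Char) : Prop := List.IsChain (fun a b => pvMatchA a b = false) l

theorem pvEqDropLastConcat {l : List Char} {g : Char} (h : l.getLast? = some g) :
    l = l.dropLast ++ [g] :=
  (List.dropLast_append_getLast? g h).symm

theorem pvIrred_last {l : List Char} {g2 g : Char} (hl : pvIrred l)
    (hg : l.getLast? = some g) (hg2 : l.dropLast.getLast? = some g2) :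
    pvMatchA g2 g = false := by
  have hl' : List.IsChain (fun a b => pvMatchA a b = false) (l.dropLast ++ [g]) := by
    rw [← pvEqDropLastConcat hg]; exact hl
  have := (List.isChain_append.mp hl').2.2 g2 (by simp [hg2]) g (by simp)
  simpa using this

theorem pvIrred_reduceL (l : List Char) : pvIrred (pvReduceL l) := by
  induction l using List.reverseRecOn with
  | nil => exact List.isChain_nil
  | append_singleton u c ih =>
    rw [pvReduceL_concat]
    cases hg : (pvReduceL u).getLast? with
    | none =>
      rw [pvPush, hg]; exact List.isChain_singleton c
    | some g =>
      rw [pvPush_last hg]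
      split_ifs with hm
      · exact ih.prefix (List.dropLast_prefix _)
      · refine List.IsChain.append ih (List.isChain_singleton c) ?_
        intro x hx y hy
        rw [hg] at hx; cases hx
        cases hy
        simpa using hm

theorem pvRemoveFirst_none_iff (l : List Char) : pvRemoveFirst l = none ↔ pvIrred l := by
  induction l with
  | nil => simp [pvRemoveFirst, pvIrred, List.isChain_nil]
  | cons a l ih =>
    cases l with
    | nil => simp [pvRemoveFirst, pvIrred, List.isChain_singleton]
    | cons b r =>
      rw [pvRemoveFirst]
      split_ifs with hm
      · simp only [pvIrred, List.isChain_cons_cons]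
        constructor
        · intro h; cases h
        · rintro ⟨h1, -⟩; rw [pvMatchAB] at h1; rw [hm] at h1; cases h1
      · rw [Option.map_eq_none_iff, ih]
        simp only [pvIrred, List.isChain_cons_cons]
        constructor
        · intro h; exact ⟨by rw [pvMatchAB]; simpa using hm, h⟩
        · rintro ⟨-, h⟩; exact h

theorem pvIrred_reduce_self (l : List Char) (h : pvIrred l) : pvReduceL l = l := by
  induction l using List.reverseRecOn with
  | nil => rfl
  | append_singleton u c ih =>
    have hu : pvIrred u := h.prefix (List.prefix_append _ _)
    rw [pvReduceL_concat, ih hu]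
    cases hg : u.getLast? with
    | none => rw [pvPush, hg]; rw [List.getLast?_eq_none_iff] at hg; rw [hg]; rfl
    | some g =>
      rw [pvPush_last hg]
      have hgc : pvMatchA g c = false := by
        have hg' : (u ++ [c]).getLast? = some c := by simp
        have hg2 : (u ++ [c]).dropLast.getLast? = some g := by
          rw [List.dropLast_concat]; exact hg
        exact pvIrred_last h hg' hg2
      rw [if_neg (by simp [hgc])]

-- deleting a reacting pair after an irreducible stack is a no-op on the stack
theorem pvPush_pair {w : List Char} (hw : pvIrred w) {a b : Char} (hab : pvMatchA a b = true) :
    pvPush (pvPush w a) b = w := by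
  cases hg : w.getLast? with
  | none =>
    rw [List.getLast?_eq_none_iff] at hg; subst hg
    rw [pvPush_nil, pvPush_last List.getLast?_singleton, if_pos hab]
    rfl
  | some g =>
    by_cases hga : pvMatchA g a = true
    · -- w pops; then b = g goes back on
      have hgb : g = b := pvMatchA_unique hga hab
      rw [pvPush_last hg, if_pos hga]
      cases hg2 : w.dropLast.getLast? with
      | none =>
        rw [List.getLast?_eq_none_iff] at hg2
        rw [pvPush, hg2, List.getLast?_nil]
        rw [pvEqDropLastConcat hg, hg2, hgb]
        rfl
      | some g2 =>
        have hg2g : pvMatchA g2 g = false := pvIrred_last hw hg hg2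
        rw [hgb] at hg2g
        rw [pvPush_last hg2, if_neg (by simp [hg2g])]
        conv_rhs => rw [pvEqDropLastConcat hg, hgb]
    · -- a goes on; then b reacts with a and pops
      rw [pvPush_last hg, if_neg hga]
      rw [pvPush_last (by simp : (w ++ [a]).getLast? = some a), if_pos hab]
      simp

-- deleting a reacting pair anywhere does not change the left reduction
theorem pvReduceL_del (u v : List Char) {a b : Char} (hab : pvMatchA a b = true) :
    pvReduceL (u ++ a :: b :: v) = pvReduceL (u ++ v) := by
  have hw := pvIrred_reduceL u
  rw [pvReduceL] at hw
  rw [pvReduceL, pvReduceL, List.foldl_append, List.foldl_append]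
  show List.foldl pvPush (pvPush (pvPush (List.foldl pvPush [] u) a) b) v = _
  rw [pvPush_pair hw hab]

theorem pvRemoveFirst_shape : ∀ {s t : List Char}, pvRemoveFirst s = some t →
    ∃ u a b v, s = u ++ a :: b :: v ∧ t = u ++ v ∧ pvMatchA a b = true := by
  intro s
  induction s with
  | nil => intro t h; simp [pvRemoveFirst] at h
  | cons x s ih =>
    intro t h
    cases s with
    | nil => simp [pvRemoveFirst] at h
    | cons y r =>
      rw [pvRemoveFirst] at h
      split_ifs at h with hm
      · cases h
        exact ⟨[], x, y, _, rfl, rfl, by rw [pvMatchAB]; exact hm⟩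
      · simp only [Option.map_eq_some_iff] at h
        obtain ⟨t', ht', rfl⟩ := h
        obtain ⟨u, a, b, v, h1, h2, h3⟩ := ih ht'
        exact ⟨x :: u, a, b, v, by rw [List.cons_append, ← h1], by rw [List.cons_append, ← h2], h3⟩

theorem pvFixB_eq_reduceL_aux : ∀ (n : Nat) (s : List Char), s.length ≤ n →
    pvFixB s = pvReduceL s := by
  intro n
  induction n with
  | zero =>
    intro s hs
    rw [pvFixB]
    split
    next h =>
      exact (pvIrred_reduce_self s ((pvRemoveFirst_none_iff s).mp h)).symm
    next t h =>
      have := pvRemoveFirst_length h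
      omega
  | succ m ih =>
    intro s hs
    rw [pvFixB]
    split
    next h =>
      exact (pvIrred_reduce_self s ((pvRemoveFirst_none_iff s).mp h)).symm
    next t h =>
      have hlen := pvRemoveFirst_length h
      obtain ⟨u, a, b, v, h1, h2, h3⟩ := pvRemoveFirst_shape h
      rw [ih t (by omega), h1, h2, pvReduceL_del u v h3]

theorem pvFixB_eq_reduceL (s : List Char) : pvFixB s = pvReduceL s :=
  pvFixB_eq_reduceL_aux s.length s (le_refl _)

def pvReduceL_take_succ (l : List Char) (i : Nat) (h : i < l.length) :
    pvReduceL (l.take (i + 1)) = pvPush (pvReduceL (l.take i)) l[i] := by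
  rw [List.take_succ, List.getElem?_eq_getElem h]
  exact pvReduceL_concat _ _

theorem pvLoopA_eq (l : List Char)
    (hpre : ¬(3 ≤ l.length ∧ pvReduceL l.dropLast = [])) :
    ∀ n bi ans, l.length - bi ≤ n → 1 ≤ bi → bi ≤ l.length →
      ans = pvReduceL (l.take bi) → pvLoopA l ans bi = pvReduceL l := by
  intro n
  induction n with
  | zero =>
    intro bi ans h0 h1 h2 hans
    have hbi : bi = l.length := by omega
    rw [pvLoopA, dif_neg (by omega), hans, hbi, List.take_length]
  | succ m ih =>
    intro bi ans h0 h1 h2 hans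
    by_cases hlt : bi < l.length
    · rw [pvLoopA, dif_pos hlt]
      by_cases hne : ans = []
      · rw [dif_pos hne]
        -- ans = [] means the reduction of the first bi characters is empty, so bi ≥ 2
        have hbi2 : 2 ≤ bi := by
          rcases Nat.lt_or_ge bi 2 with hb | hb
          · exfalso
            have hbi1 : bi = 1 := by omega
            rw [hbi1] at hans
            have : l.take 1 = [l[0]'(by omega)] := by
              rw [List.take_one]
              rw [List.head?_eq_getElem?, List.getElem?_eq_getElem (by omega)]
              rfl
            rw [this] at hans
            simp [pvReduceL, pvPush, hne] at hans
          · exact hb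
        -- bi + 1 < l.length, else A would have crashed (excluded by hpre)
        have hsucc : bi + 1 < l.length := by
          rcases Nat.lt_or_ge (bi+1) l.length with hb | hb
          · exact hb
          have hlen : bi + 1 = l.length := by omega
          exfalso
          apply hpre
          constructor
          · omega
          · have : l.dropLast = l.take bi := by
              rw [List.dropLast_eq_take]; congr 1; omega
            rw [this, ← hans, hne]
        rw [PySem.List.pyGet?_natCast, List.getElem?_eq_getElem hsucc]
        show (if pvMatchA (l[bi]'hlt) (l[bi+1]'hsucc) = true
                then pvLoopA l ([l[bi]'hlt] : List Char).dropLast (bi + 2)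
              else pvLoopA l (([l[bi]'hlt] : List Char) ++ [l[bi+1]'hsucc]) (bi + 2)) = pvReduceL l
        have hr1 : pvReduceL (l.take (bi + 1)) = [l[bi]] := by
          rw [pvReduceL_take_succ l bi hlt, ← hans, hne, pvPush_nil]
        by_cases hm : pvMatchA (l[bi]) (l[bi+1]) = true
        · rw [if_pos hm]
          apply ih (bi + 2) _ (by omega) (by omega) (by omega)
          rw [pvReduceL_take_succ l (bi+1) hsucc, hr1,
              pvPush_last List.getLast?_singleton, if_pos hm]
        · rw [if_neg hm]
          apply ih (bi + 2) _ (by omega) (by omega) (by omega)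
          rw [pvReduceL_take_succ l (bi+1) hsucc, hr1,
              pvPush_last List.getLast?_singleton, if_neg hm]
      · rw [dif_neg hne]
        have hg : ans.getLast? = some (ans.getLast hne) := List.getLast?_eq_getLast ..
        have hnext : (if pvMatchA (ans.getLast hne) l[bi] then ans.dropLast else ans ++ [l[bi]])
            = pvReduceL (l.take (bi + 1)) := by
          rw [pvReduceL_take_succ l bi hlt, ← hans, pvPush_last hg]
        by_cases hm : pvMatchA (ans.getLast hne) (l[bi]) = true
        · rw [if_pos hm]
          apply ih (bi + 1) _ (by omega) (by omega) (by omega)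
          rw [← hnext, if_pos hm]
        · rw [if_neg hm]
          apply ih (bi + 1) _ (by omega) (by omega) (by omega)
          rw [← hnext, if_neg hm]
    · rw [pvLoopA, dif_neg hlt, hans]
      have : bi = l.length := by omega
      rw [this, List.take_length]

theorem main_eq (polymer : String)
    (h1 : polymer ≠ "")
    (h2 : ¬(3 ≤ polymer.toList.length ∧ pvReduceL polymer.toList.dropLast = [])) :
    collapse_polymer polymer = collapse_polymer_alt polymer := by
  rw [collapse_polymer, collapse_polymer_alt, pvFixB_eq_reduceL]
  cases hl : polymer.toList with
  | nil => exact absurd (String.toList_eq_nil_iff.mp hl) h1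
  | cons c0 rest =>
    rw [PySem.List.pyGet?_zero_cons]
    show String.mk (pvLoopA (c0 :: rest) [c0] 1) = String.mk (pvReduceL (c0 :: rest))
    congr 1
    apply pvLoopA_eq (c0 :: rest) (by rw [← hl]; exact h2) (c0 :: rest).length 1 [c0]
      (by omega) (by omega) (by simp)
    rw [List.take_one, List.head?_cons]
    rfl

-- ===== VERDICT (by name: the statement is the Claim_ definition above) =====
theorem collapse_polymer_spec : Claim_equal_collapse_polymer := by
  intro polymer _ hpre
  unfold Pre_collapse_polymer at hpre
  unfold Spec_collapse_polymer
  exact main_eq polymer hpre.1 hpre.2
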